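-- pv_equiv track=rewrite | github.com/mavroudisv/Crux | automation/boto_funcs.py | get_url_roles
-- ===== SOURCE A (Python) =====
-- def get_url_roles(urls):
-- 	roles={}
-- 	authority = []
-- 	processor = []
-- 	client = []
-- 	for u in urls:
-- 		if "authority" in u:
-- 			authority.append(urls[u])
-- 		elif "processor" in u:
-- 			processor.append(urls[u])
-- 		elif "client" in u:
-- 			client.append(urls[u])
--
-- 	roles["authority"] = authority
-- 	roles["processor"] = processor
-- 	roles["client"] = client
-- 	return roles
-- ===== SOURCE B (Python) =====
-- ROLE_NAMES = ("authority", "processor", "client")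
--
-- def get_url_roles(urls):
--     roles = {}
--     remaining = list(urls)
--     for name in ROLE_NAMES:
--         roles[name] = [urls[u] for u in remaining if name in u]
--         remaining = [u for u in remaining if name not in u]
--     return roles
-- ===== Notes on version B (the rewrite author's own statement) =====
-- stated objective: alternative
-- what changed: Replaces A's single pass that classifies each key by an if/elif chain with three staged filter passes: for each role in order, collect the values whose key contains the role name and remove those keys from the remaining pool, so first-match precedence falls out of the staging rather than a branch chain.
import Mathlib
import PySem

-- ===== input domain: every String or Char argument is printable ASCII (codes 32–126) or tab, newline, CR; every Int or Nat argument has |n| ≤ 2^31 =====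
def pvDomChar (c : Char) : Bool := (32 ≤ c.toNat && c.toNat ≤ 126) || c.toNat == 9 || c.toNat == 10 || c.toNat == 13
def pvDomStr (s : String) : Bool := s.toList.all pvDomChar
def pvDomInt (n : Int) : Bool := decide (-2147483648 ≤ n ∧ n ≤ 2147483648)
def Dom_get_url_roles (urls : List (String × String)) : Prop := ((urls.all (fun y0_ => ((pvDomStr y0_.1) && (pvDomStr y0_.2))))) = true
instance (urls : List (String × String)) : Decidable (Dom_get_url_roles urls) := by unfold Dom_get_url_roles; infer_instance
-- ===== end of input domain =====

-- B replaces A's single classifying pass (if/elif chain per key) by three staged filter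
-- passes over a shrinking key pool, one per role in order (alternative; same cost).

-- ===== PORT A =====
-- A iterates over the dict's keys, sorting each value into one of three lists via an
-- if/elif chain, then builds the result dict from the three lists.
def pvStepA (d : PySem.Dict String String)
    (acc : List String × List String × List String) (u : String) :
    List String × List String × List String :=
  if PySem.Str.isIn "authority" u then (acc.1 ++ [d.getD u ""], acc.2.1, acc.2.2)
  else if PySem.Str.isIn "processor" u then (acc.1, acc.2.1 ++ [d.getD u ""], acc.2.2)
  else if PySem.Str.isIn "client" u then (acc.1, acc.2.1, acc.2.2 ++ [d.getD u ""])
  else acc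

def pvLoopA (d : PySem.Dict String String)
    (acc : List String × List String × List String) (ks : List String) :
    List String × List String × List String :=
  ks.foldl (pvStepA d) acc

-- roles["authority"] = authority; roles["processor"] = processor; roles["client"] = client
def pvWrapA (acc : List String × List String × List String) : List (String × List String) :=
  (((PySem.Dict.empty.insert "authority" acc.1).insert "processor" acc.2.1).insert "client" acc.2.2).items

def get_url_roles (urls : List (String × String)) : List (String × List String) :=
  pvWrapA (pvLoopA (PySem.Dict.ofList urls) ([], [], []) (PySem.Dict.ofList urls).keys)

-- ===== PORT B =====
def pvRoleNames : List String := ["authority", "processor", "client"]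

-- one iteration of B's for-loop: roles[name] = [urls[u] for u in remaining if name in u];
-- remaining = [u for u in remaining if name not in u]
def pvStepB (d : PySem.Dict String String)
    (st : PySem.Dict String (List String) × List String) (name : String) :
    PySem.Dict String (List String) × List String :=
  (st.1.insert name ((st.2.filter (fun u => PySem.Str.isIn name u)).map (fun u => d.getD u "")),
   st.2.filter (fun u => !(PySem.Str.isIn name u)))

def get_url_roles_alt (urls : List (String × String)) : List (String × List String) :=
  (pvRoleNames.foldl (pvStepB (PySem.Dict.ofList urls))
    (PySem.Dict.empty, (PySem.Dict.ofList urls).keys)).1.items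

-- ===== PRECONDITION & SPEC =====
def Spec_get_url_roles (urls : List (String × String)) (out : List (String × List String)) : Prop := out = get_url_roles_alt urls
instance (urls : List (String × String)) (out : List (String × List String)) : Decidable (Spec_get_url_roles urls out) := by unfold Spec_get_url_roles; infer_instance

-- ===== CLAIM (what is proved, stated in full; the proofs are below) =====
def Claim_equal_get_url_roles : Prop := ∀ (urls : List (String × String)), Dom_get_url_roles urls → Spec_get_url_roles urls (get_url_roles urls)

-- ===== LEMMAS AND PROOFS =====

-- characterisation of A's single pass: each bucket is a filter of the key list,
-- the later buckets filtered through the negations of the earlier conditions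
theorem pv_loopA_char (d : PySem.Dict String String) (ks : List String)
    (acc : List String × List String × List String) :
    pvLoopA d acc ks =
      (acc.1 ++ (ks.filter (fun u => PySem.Str.isIn "authority" u)).map (fun u => d.getD u ""),
       acc.2.1 ++ (((ks.filter (fun u => !(PySem.Str.isIn "authority" u))).filter
           (fun u => PySem.Str.isIn "processor" u)).map (fun u => d.getD u "")),
       acc.2.2 ++ ((((ks.filter (fun u => !(PySem.Str.isIn "authority" u))).filter
           (fun u => !(PySem.Str.isIn "processor" u))).filter
           (fun u => PySem.Str.isIn "client" u)).map (fun u => d.getD u ""))) := by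
  induction ks generalizing acc with
  | nil => simp [pvLoopA]
  | cons u ks ih =>
    simp only [pvLoopA, List.foldl_cons] at *
    rw [ih]
    by_cases h1 : PySem.Str.isIn "authority" u
    · simp [PySem.Str.isIn] at h1
      simp [pvStepA, PySem.Str.isIn, h1]
    · by_cases h2 : PySem.Str.isIn "processor" u
      · simp [PySem.Str.isIn] at h1 h2
        simp [pvStepA, PySem.Str.isIn, h1, h2]
      · by_cases h3 : PySem.Str.isIn "client" u
        · simp [PySem.Str.isIn] at h1 h2 h3
          simp [pvStepA, PySem.Str.isIn, h1, h2, h3]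
        · simp [PySem.Str.isIn] at h1 h2 h3
          simp [pvStepA, PySem.Str.isIn, h1, h2, h3]

-- ===== VERDICT (by name: the statement is the Claim_ definition above) =====
theorem get_url_roles_spec : Claim_equal_get_url_roles := by
  intro urls _
  unfold Spec_get_url_roles get_url_roles get_url_roles_alt
  rw [pv_loopA_char]
  simp [pvRoleNames, pvStepB, pvWrapA, PySem.Dict.insert, PySem.Dict.contains,
    PySem.Dict.empty]
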